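-- pv_equiv track=rewrite | github.com/Xoadra/AdventOfCode2020 | Day 10/main.py | jolt_differences
-- ===== SOURCE A (Python) =====
-- def jolt_differences(jolts):
--     jolts.sort()
--     onesets, threesets = 1, 1
--     for index in range(len(jolts)):
--         if jolts[index] - 1 == jolts[index - 1]:
--             onesets += 1
--         elif jolts[index] - 3 == jolts[index - 1]:
--             threesets += 1
--     return onesets * threesets
-- ===== SOURCE B (Python) =====
-- def jolt_differences(jolts):
--     jolts.sort()
--     s = set(jolts)
--     ones = sum(1 for v in s if v + 1 in s)
--     threes = sum(1 for v in s if v + 3 in s and v + 1 not in s and v + 2 not in s)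
--     return (ones + 1) * (threes + 1)
-- ===== Notes on version B (the rewrite author's own statement) =====
-- stated objective: alternative
-- what changed: Replaces A's indexed scan of the sorted list (with its wraparound comparison to jolts[-1]) by a hash-set algorithm: a 1-gap exists exactly for each distinct value v with v+1 present, and a 3-gap exactly for each distinct v with v+3 present and v+1, v+2 absent, so both counts come from set-membership tests with no adjacency scan.
import Mathlib
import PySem

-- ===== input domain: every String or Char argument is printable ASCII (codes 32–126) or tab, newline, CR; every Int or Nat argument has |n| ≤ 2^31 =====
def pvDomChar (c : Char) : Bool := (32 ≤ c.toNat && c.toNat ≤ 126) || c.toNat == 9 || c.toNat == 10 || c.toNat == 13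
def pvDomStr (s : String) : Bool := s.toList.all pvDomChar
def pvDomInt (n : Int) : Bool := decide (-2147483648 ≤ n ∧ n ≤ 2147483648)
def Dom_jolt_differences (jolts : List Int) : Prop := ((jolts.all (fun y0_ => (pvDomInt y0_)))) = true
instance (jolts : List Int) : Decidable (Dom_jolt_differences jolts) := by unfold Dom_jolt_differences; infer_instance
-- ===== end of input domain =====

-- B replaces A's indexed adjacency scan of the sorted list by a set-membership algorithm
-- (a 1-gap per distinct v with v+1 present; a 3-gap per distinct v with v+3 present and v+1, v+2 absent).
-- Both Pythons sort the argument in place; the equivalence proved is about the return value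
-- (B performs the same in-place sort as A).

-- ===== PORT A =====
-- the loop's xs[index] / xs[index-1] are always in range (index-1 = -1 wraps), so pyGetD is exact here
def jolt_differences (jolts : List Int) : Int :=
  let s := PySem.List.sorted jolts (fun x => x) false
  let p := (PySem.List.pyRange 0 (s.length : Int) 1).foldl
    (fun (acc : Int × Int) index =>
      if PySem.List.pyGetD s index 0 - 1 = PySem.List.pyGetD s (index - 1) 0 then
        (acc.1 + 1, acc.2)
      else if PySem.List.pyGetD s index 0 - 3 = PySem.List.pyGetD s (index - 1) 0 then
        (acc.1, acc.2 + 1)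
      else acc) (1, 1)
  p.1 * p.2

-- ===== PORT B =====
-- sum(1 for v in S if p(v)) over a Python set is order-independent: it is countP over the set's elements
def jolt_differences_alt (jolts : List Int) : Int :=
  let s := PySem.List.sorted jolts (fun x => x) false
  let S : PySem.Set Int := PySem.Set.ofList s
  let ones : Int := (S.countP (fun v => PySem.Set.contains S (v + 1)) : Int)
  let threes : Int := (S.countP (fun v =>
      PySem.Set.contains S (v + 3) && !PySem.Set.contains S (v + 1) && !PySem.Set.contains S (v + 2)) : Int)
  (ones + 1) * (threes + 1)

-- ===== PRECONDITION & SPEC =====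
def Spec_jolt_differences (jolts : List Int) (out : Int) : Prop := out = jolt_differences_alt jolts
instance (jolts : List Int) (out : Int) : Decidable (Spec_jolt_differences jolts out) := by unfold Spec_jolt_differences; infer_instance

-- ===== CLAIM (what is proved, stated in full; the proofs are below) =====
def Claim_equal_jolt_differences : Prop := ∀ (jolts : List Int), Dom_jolt_differences jolts → Spec_jolt_differences jolts (jolt_differences jolts)

-- ===== LEMMAS AND PROOFS =====

-- the list of consecutive differences of a list
def adjDiffs : List Int → List Int
  | x :: y :: t => (y - x) :: adjDiffs (y :: t)
  | _ => []

-- duplicate-collapsing of a SORTED list (keeps one value per run)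
def sdedup : List Int → List Int
  | x :: y :: t => if x = y then sdedup (y :: t) else x :: sdedup (y :: t)
  | l => l

lemma mem_sdedup (v : Int) : ∀ (l : List Int), v ∈ sdedup l ↔ v ∈ l := by
  intro l
  induction l with
  | nil => simp [sdedup]
  | cons x t ih =>
    cases t with
    | nil => simp [sdedup]
    | cons y t' =>
      by_cases h : x = y
      · subst h
        simp [sdedup, ih]
      · simp [sdedup, h, ih]

lemma sdedup_pairwise_lt : ∀ (l : List Int), l.Pairwise (· ≤ ·) → (sdedup l).Pairwise (· < ·) := by
  intro l
  induction l with
  | nil => simp [sdedup]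
  | cons x t ih =>
    intro hp
    have hc := List.pairwise_cons.mp hp
    cases t with
    | nil => simp [sdedup]
    | cons y t' =>
      by_cases h : x = y
      · subst h
        simpa [sdedup] using ih hc.2
      · have hx : x < y := lt_of_le_of_ne (hc.1 y (by simp)) h
        simp only [sdedup, if_neg h]
        refine List.pairwise_cons.mpr ⟨?_, ih hc.2⟩
        intro v hv
        have hvm : v ∈ y :: t' := (mem_sdedup v (y :: t')).mp hv
        rcases List.mem_cons.mp hvm with rfl | hvm'
        · exact hx
        · exact lt_of_lt_of_le hx ((List.pairwise_cons.mp hc.2).1 v hvm')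

-- two Nodup lists with the same membership are permutations
lemma perm_of_nodup_mem_iff {a b : List Int} (ha : a.Nodup) (hb : b.Nodup)
    (h : ∀ v, v ∈ a ↔ v ∈ b) : a.Perm b := by
  rw [List.perm_iff_count]
  intro v
  by_cases hv : v ∈ a
  · rw [List.count_eq_one_of_mem ha hv, List.count_eq_one_of_mem hb ((h v).mp hv)]
  · rw [List.count_eq_zero_of_not_mem hv, List.count_eq_zero_of_not_mem (fun hc => hv ((h v).mpr hc))]

-- counting 1-gaps: adjacent differences vs distinct values with successor present
lemma count1_eq : ∀ (s : List Int), s.Pairwise (· ≤ ·) →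
    (adjDiffs s).count 1 = (sdedup s).countP (fun v => decide (v + 1 ∈ s)) := by
  intro s
  induction s with
  | nil => simp [adjDiffs, sdedup]
  | cons x t ih =>
    intro hp
    have hc := List.pairwise_cons.mp hp
    cases t with
    | nil => simp [adjDiffs, sdedup]
    | cons y t' =>
      have hxy : x ≤ y := hc.1 y (by simp)
      have hymin : ∀ z ∈ y :: t', y ≤ z := by
        intro z hz
        rcases List.mem_cons.mp hz with rfl | hz'
        · exact le_refl _
        · exact (List.pairwise_cons.mp hc.2).1 z hz'
      by_cases h : x = y
      · subst h
        simp only [adjDiffs, sdedup, sub_self]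
        rw [List.count_cons_of_ne (by norm_num), ih hc.2]
        apply List.countP_congr
        intro v hv
        have e1 : (v + 1 ∈ x :: x :: t') ↔ (v + 1 ∈ x :: t') := by simp [List.mem_cons]
        simp [e1]
      · have hx : x < y := lt_of_le_of_ne hxy h
        simp only [adjDiffs, sdedup, if_neg h]
        have hpx : (decide (x + 1 ∈ x :: y :: t') = true) ↔ y - x = 1 := by
          simp only [decide_eq_true_eq, List.mem_cons]
          constructor
          · rintro (hh | hh | hh)
            · omega
            · omega
            · have := hymin _ (List.mem_cons_of_mem y hh); omega
          · intro hh
            right; left; omega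
        have htail : (sdedup (y :: t')).countP (fun v => decide (v + 1 ∈ x :: y :: t'))
            = (sdedup (y :: t')).countP (fun v => decide (v + 1 ∈ y :: t')) := by
          apply List.countP_congr
          intro v hv
          have hvy : y ≤ v := hymin v ((mem_sdedup v (y :: t')).mp hv)
          have e1 : (v + 1 ∈ x :: y :: t') ↔ (v + 1 ∈ y :: t') := by
            simp only [List.mem_cons]
            constructor
            · rintro (hh | hh)
              · exact absurd hh (by omega)
              · exact hh
            · exact fun hh => Or.inr hh
          simp [e1]
        rw [List.count_cons, List.countP_cons, ih hc.2, htail]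
        congr 1
        by_cases hd : y - x = 1
        · rw [if_pos (by simp [hd] : ((y - x) == (1 : Int)) = true), if_pos (hpx.mpr hd)]
        · rw [if_neg (by simp only [beq_iff_eq]; exact hd), if_neg (fun hh => hd (hpx.mp hh))]

lemma count3_eq : ∀ (s : List Int), s.Pairwise (· ≤ ·) →
    (adjDiffs s).count 3 = (sdedup s).countP (fun v =>
      decide (v + 3 ∈ s) && !decide (v + 1 ∈ s) && !decide (v + 2 ∈ s)) := by
  intro s
  induction s with
  | nil => simp [adjDiffs, sdedup]
  | cons x t ih =>
    intro hp
    have hc := List.pairwise_cons.mp hp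
    cases t with
    | nil => simp [adjDiffs, sdedup]
    | cons y t' =>
      have hxy : x ≤ y := hc.1 y (by simp)
      have hymin : ∀ z ∈ y :: t', y ≤ z := by
        intro z hz
        rcases List.mem_cons.mp hz with rfl | hz'
        · exact le_refl _
        · exact (List.pairwise_cons.mp hc.2).1 z hz'
      by_cases h : x = y
      · subst h
        simp only [adjDiffs, sdedup, sub_self]
        rw [List.count_cons_of_ne (by norm_num), ih hc.2]
        apply List.countP_congr
        intro v hv
        have e1 : (v + 3 ∈ x :: x :: t') ↔ (v + 3 ∈ x :: t') := by simp [List.mem_cons]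
        have e2 : (v + 1 ∈ x :: x :: t') ↔ (v + 1 ∈ x :: t') := by simp [List.mem_cons]
        have e3 : (v + 2 ∈ x :: x :: t') ↔ (v + 2 ∈ x :: t') := by simp [List.mem_cons]
        simp [e1, e2, e3]
      · have hx : x < y := lt_of_le_of_ne hxy h
        simp only [adjDiffs, sdedup, if_neg h]
        have hpx : ((decide (x + 3 ∈ x :: y :: t') && !decide (x + 1 ∈ x :: y :: t')
            && !decide (x + 2 ∈ x :: y :: t')) = true) ↔ y - x = 3 := by
          simp only [Bool.and_eq_true, Bool.not_eq_true', decide_eq_true_eq,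
            decide_eq_false_iff_not, List.mem_cons]
          constructor
          · rintro ⟨⟨h3, h1⟩, h2⟩
            rcases h3 with hh | hh | hh
            · omega
            · omega
            · have hy3 := hymin _ (List.mem_cons_of_mem y hh)
              have hy1 : y ≠ x + 1 := fun he => h1 (Or.inr (Or.inl he.symm))
              have hy2 : y ≠ x + 2 := fun he => h2 (Or.inr (Or.inl he.symm))
              omega
          · intro hh
            refine ⟨⟨Or.inr (Or.inl (by omega)), ?_⟩, ?_⟩
            · rintro (he | he | he)
              · omega
              · omega
              · have := hymin _ (List.mem_cons_of_mem y he); omega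
            · rintro (he | he | he)
              · omega
              · omega
              · have := hymin _ (List.mem_cons_of_mem y he); omega
        have htail : (sdedup (y :: t')).countP (fun v => decide (v + 3 ∈ x :: y :: t')
              && !decide (v + 1 ∈ x :: y :: t') && !decide (v + 2 ∈ x :: y :: t'))
            = (sdedup (y :: t')).countP (fun v => decide (v + 3 ∈ y :: t')
              && !decide (v + 1 ∈ y :: t') && !decide (v + 2 ∈ y :: t')) := by
          apply List.countP_congr
          intro v hv
          have hvy : y ≤ v := hymin v ((mem_sdedup v (y :: t')).mp hv)
          have e3 : (v + 3 ∈ x :: y :: t') ↔ (v + 3 ∈ y :: t') := by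
            simp only [List.mem_cons]
            constructor
            · rintro (hh | hh)
              · exact absurd hh (by omega)
              · exact hh
            · exact fun hh => Or.inr hh
          have e1 : (v + 1 ∈ x :: y :: t') ↔ (v + 1 ∈ y :: t') := by
            simp only [List.mem_cons]
            constructor
            · rintro (hh | hh)
              · exact absurd hh (by omega)
              · exact hh
            · exact fun hh => Or.inr hh
          have e2 : (v + 2 ∈ x :: y :: t') ↔ (v + 2 ∈ y :: t') := by
            simp only [List.mem_cons]
            constructor
            · rintro (hh | hh)
              · exact absurd hh (by omega)
              · exact hh
            · exact fun hh => Or.inr hh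
          simp [e1, e2, e3]
        rw [List.count_cons, List.countP_cons, ih hc.2, htail]
        congr 1
        by_cases hd : y - x = 3
        · rw [if_pos (by simp [hd] : ((y - x) == (3 : Int)) = true), if_pos (hpx.mpr hd)]
        · rw [if_neg (by simp only [beq_iff_eq]; exact hd), if_neg (fun hh => hd (hpx.mp hh))]

-- A's diffs (indexed through pyGetD over range(1, n)) are adjDiffs
-- adjDiffs as an index map
lemma adjDiffs_eq_range_map : ∀ (s : List Int),
    adjDiffs s = (List.range (s.length - 1)).map (fun k => s.getD (k + 1) 0 - s.getD k 0) := by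
  intro s
  induction s with
  | nil => simp [adjDiffs]
  | cons x t ih =>
    cases t with
    | nil => simp [adjDiffs]
    | cons y t' =>
      rw [show adjDiffs (x :: y :: t') = (y - x) :: adjDiffs (y :: t') from rfl, ih]
      rw [show (x :: y :: t').length - 1 = ((y :: t').length - 1) + 1 by simp]
      rw [List.range_succ_eq_map]
      simp [List.map_map, Function.comp]

lemma map_pyRange_eq_adjDiffs (s : List Int) :
    (PySem.List.pyRange 1 (s.length : Int) 1).map
      (fun i => PySem.List.pyGetD s i 0 - PySem.List.pyGetD s (i - 1) 0) = adjDiffs s := by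
  rw [adjDiffs_eq_range_map, PySem.List.pyRange_one, List.map_map]
  have hlen : ((s.length : Int) - 1).toNat = s.length - 1 := by omega
  rw [hlen]
  apply List.map_congr_left
  intro k hk
  simp only [Function.comp]
  rw [show (1 : Int) + (k : Int) = ((k + 1 : Nat) : Int) by push_cast; ring]
  rw [show ((k + 1 : Nat) : Int) - 1 = ((k : Nat) : Int) by push_cast; ring]
  rw [PySem.List.pyGetD_natCast, PySem.List.pyGetD_natCast]

-- folding A's branchy step over a list of difference values counts the 1s and the 3s
lemma foldl_diff_count (xs : List Int) (o t : Int) :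
    xs.foldl (fun (acc : Int × Int) d =>
      if d = 1 then (acc.1 + 1, acc.2)
      else if d = 3 then (acc.1, acc.2 + 1)
      else acc) (o, t) = (o + (xs.count 1 : Int), t + (xs.count 3 : Int)) := by
  induction xs generalizing o t with
  | nil => simp
  | cons x xs ih =>
    by_cases h1 : x = 1
    · subst h1
      simp [List.foldl_cons, ih]
      ring
    · by_cases h3 : x = 3
      · subst h3
        simp [List.foldl_cons, ih]
        ring
      · simp [List.foldl_cons, h1, h3, ih]

-- A's index fold over range(1, n) is the fold of the branchy step over the differences list
lemma foldl_idx_eq_foldl_diffs (s : List Int) (o t : Int) :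
    (PySem.List.pyRange 1 (s.length : Int) 1).foldl
      (fun (acc : Int × Int) index =>
        if PySem.List.pyGetD s index 0 - 1 = PySem.List.pyGetD s (index - 1) 0 then
          (acc.1 + 1, acc.2)
        else if PySem.List.pyGetD s index 0 - 3 = PySem.List.pyGetD s (index - 1) 0 then
          (acc.1, acc.2 + 1)
        else acc) (o, t)
    = ((PySem.List.pyRange 1 (s.length : Int) 1).map
        (fun i => PySem.List.pyGetD s i 0 - PySem.List.pyGetD s (i - 1) 0)).foldl
      (fun (acc : Int × Int) d =>
        if d = 1 then (acc.1 + 1, acc.2)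
        else if d = 3 then (acc.1, acc.2 + 1)
        else acc) (o, t) := by
  rw [List.foldl_map]
  have hfun : (fun (acc : Int × Int) index =>
        if PySem.List.pyGetD s index 0 - 1 = PySem.List.pyGetD s (index - 1) 0 then
          (acc.1 + 1, acc.2)
        else if PySem.List.pyGetD s index 0 - 3 = PySem.List.pyGetD s (index - 1) 0 then
          (acc.1, acc.2 + 1)
        else acc)
      = (fun (acc : Int × Int) i =>
        if PySem.List.pyGetD s i 0 - PySem.List.pyGetD s (i - 1) 0 = 1 then
          (acc.1 + 1, acc.2)
        else if PySem.List.pyGetD s i 0 - PySem.List.pyGetD s (i - 1) 0 = 3 then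
          (acc.1, acc.2 + 1)
        else acc) := by
    funext acc i
    have h1 : (PySem.List.pyGetD s i 0 - 1 = PySem.List.pyGetD s (i - 1) 0)
        ↔ (PySem.List.pyGetD s i 0 - PySem.List.pyGetD s (i - 1) 0 = 1) := by omega
    have h3 : (PySem.List.pyGetD s i 0 - 3 = PySem.List.pyGetD s (i - 1) 0)
        ↔ (PySem.List.pyGetD s i 0 - PySem.List.pyGetD s (i - 1) 0 = 3) := by omega
    simp only [h1, h3]
  rw [hfun]

-- in a ≤-sorted list the first element is at most the last
lemma headD_le_getLast (s : List Int) (hp : s.Pairwise (· ≤ ·)) (h : s ≠ []) :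
    s.getD 0 0 ≤ s.getLast h := by
  match s with
  | x :: t =>
    have hc := List.pairwise_cons.mp hp
    have hm : (x :: t).getLast h ∈ x :: t := List.getLast_mem h
    rcases List.mem_cons.mp hm with heq | hmem
    · rw [heq]; simp
    · simp only [List.getD_cons_zero]; exact hc.1 _ hmem

-- A's whole fold, as the two adjDiffs counts (index 0's wraparound comparisons never fire)
lemma foldA_counts (s : List Int) (hp : s.Pairwise (· ≤ ·)) :
    (PySem.List.pyRange 0 (s.length : Int) 1).foldl
      (fun (acc : Int × Int) index =>
        if PySem.List.pyGetD s index 0 - 1 = PySem.List.pyGetD s (index - 1) 0 then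
          (acc.1 + 1, acc.2)
        else if PySem.List.pyGetD s index 0 - 3 = PySem.List.pyGetD s (index - 1) 0 then
          (acc.1, acc.2 + 1)
        else acc) (1, 1)
    = (1 + ((adjDiffs s).count 1 : Int), 1 + ((adjDiffs s).count 3 : Int)) := by
  by_cases hnil : s = []
  · subst hnil
    simp [adjDiffs, PySem.List.pyRange_one_eq_nil]
  · have hlen : 0 < s.length := List.length_pos_iff.mpr hnil
    have hcons : PySem.List.pyRange 0 (s.length : Int) 1
        = 0 :: PySem.List.pyRange 1 (s.length : Int) 1 := by
      have := PySem.List.pyRange_one_cons (a := 0) (b := (s.length : Int)) (by exact_mod_cast hlen)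
      simpa using this
    have hle : s.getD 0 0 ≤ s.getLast hnil := headD_le_getLast s hp hnil
    have hg0 : PySem.List.pyGetD s 0 0 = s.getD 0 0 := PySem.List.pyGetD_zero s 0
    have hgm1 : PySem.List.pyGetD s ((0 : Int) - 1) 0 = s.getLast hnil := by
      rw [show ((0 : Int) - 1) = -1 by ring, PySem.List.pyGetD_neg_one s 0 hnil]
    have h01 : ¬ (PySem.List.pyGetD s 0 0 - 1 = PySem.List.pyGetD s ((0 : Int) - 1) 0) := by
      rw [hg0, hgm1]; omega
    have h03 : ¬ (PySem.List.pyGetD s 0 0 - 3 = PySem.List.pyGetD s ((0 : Int) - 1) 0) := by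
      rw [hg0, hgm1]; omega
    rw [hcons]
    simp only [List.foldl_cons, if_neg h01, if_neg h03]
    rw [foldl_idx_eq_foldl_diffs, foldl_diff_count, map_pyRange_eq_adjDiffs]

-- ===== VERDICT (by name: the statement is the Claim_ definition above) =====
theorem jolt_differences_spec : Claim_equal_jolt_differences := by
  intro jolts _
  unfold Spec_jolt_differences jolt_differences jolt_differences_alt
  simp only []
  set s := PySem.List.sorted jolts (fun x => x) false with hs
  have hp : s.Pairwise (· ≤ ·) := by
    simpa using PySem.List.sorted_pairwise (xs := jolts) (key := fun x => x)
  have hperm : (sdedup s).Perm (PySem.Set.ofList s) := by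
    apply perm_of_nodup_mem_iff
    · exact ((sdedup_pairwise_lt s hp).imp (fun h => ne_of_lt h))
    · exact PySem.Set.nodup_ofList s
    · intro v
      rw [mem_sdedup, PySem.Set.mem_ofList]
  have hcont : ∀ w : Int, PySem.Set.contains (PySem.Set.ofList s) w = decide (w ∈ s) := by
    intro w
    rw [PySem.Set.contains_eq_decide]
    simp [PySem.Set.mem_ofList]
  have hc1 : (PySem.Set.ofList s).countP (fun v => PySem.Set.contains (PySem.Set.ofList s) (v + 1))
      = (adjDiffs s).count 1 := by
    rw [count1_eq s hp]
    refine (hperm.countP_eq _).symm.trans ?_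
    apply List.countP_congr
    intro v _
    rw [hcont]
  have hc3 : (PySem.Set.ofList s).countP (fun v =>
        PySem.Set.contains (PySem.Set.ofList s) (v + 3)
        && !PySem.Set.contains (PySem.Set.ofList s) (v + 1)
        && !PySem.Set.contains (PySem.Set.ofList s) (v + 2))
      = (adjDiffs s).count 3 := by
    rw [count3_eq s hp]
    refine (hperm.countP_eq _).symm.trans ?_
    apply List.countP_congr
    intro v _
    rw [hcont, hcont, hcont]
  rw [foldA_counts s hp]
  rw [hc1, hc3]
  ring
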